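-- pv_equiv track=rewrite | github.com/Jonggil-dev/Algo | 정종길/프로그래머스/카카오 3회독/2023 KAKAO BLIND RECRUITMENT/표현 가능한 이진트리.py | pharse_bin
-- ===== SOURCE A (Python) =====
-- def pharse_bin(num):
--     check = 2
--     lev = 1
--     bin_str = bin(num)[2:]
--
--     while len(bin_str) > (check ** lev - 1):
--         lev += 1
--
--     bin_str = "0" * (check ** lev - 1 - len(bin_str)) + bin_str
--     return bin_str
-- ===== SOURCE B (Python) =====
-- def pharse_bin(num):
--     bin_str = bin(num)[2:]
--     lev = len(bin_str).bit_length()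
--     return "0" * (2 ** lev - 1 - len(bin_str)) + bin_str
-- ===== Notes on version B (the rewrite author's own statement) =====
-- stated objective: idiomatic
-- what changed: The iterative while-loop search for the smallest full-tree level is replaced by the closed-form bit-length of the string length (lev = len(bin_str).bit_length()).
import Mathlib
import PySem

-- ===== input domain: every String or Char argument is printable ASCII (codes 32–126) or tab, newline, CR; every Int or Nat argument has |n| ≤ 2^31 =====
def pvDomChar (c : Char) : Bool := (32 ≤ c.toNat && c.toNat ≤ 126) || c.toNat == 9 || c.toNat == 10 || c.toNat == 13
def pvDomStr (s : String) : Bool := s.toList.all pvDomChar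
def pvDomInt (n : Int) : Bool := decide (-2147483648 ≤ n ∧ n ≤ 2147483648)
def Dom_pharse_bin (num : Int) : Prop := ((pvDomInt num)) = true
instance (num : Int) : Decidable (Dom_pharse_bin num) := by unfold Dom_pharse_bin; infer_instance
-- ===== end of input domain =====

-- B replaces A's iterative search for the tree level by the closed-form bit-length
-- of the string length (idiomatic; same results for every int, including negatives).


-- ===== PORT A =====
-- binary digits of a natural number, most significant first (empty for 0); exact for Python's bin
def pvNatBin : Nat → List Char
  | 0 => []
  | n + 1 => pvNatBin ((n + 1) / 2) ++ [if (n + 1) % 2 = 1 then '1' else '0']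

-- bin(num)[2:] : for num < 0, bin gives "-0b…" so [2:] keeps 'b' ++ digits; for 0 it is "0"
def pvBinTail (num : Int) : List Char :=
  if num < 0 then 'b' :: pvNatBin num.natAbs
  else if num = 0 then ['0'] else pvNatBin num.natAbs

-- A's while loop: increment lev while len(bin_str) > 2 ** lev - 1
def pvFindLev (L : Nat) (lev : Nat) : Nat :=
  if h : L > 2 ^ lev - 1 then pvFindLev L (lev + 1) else lev
termination_by L - lev
decreasing_by
  have h2 : lev < 2 ^ lev := Nat.lt_two_pow_self
  omega

def pharse_bin (num : Int) : String :=
  let bin_str := pvBinTail num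
  let lev := pvFindLev bin_str.length 1
  String.mk (List.replicate (2 ^ lev - 1 - bin_str.length) '0' ++ bin_str)

-- ===== PORT B =====
-- len(bin_str).bit_length() is ported as Nat.size (the corresponding Mathlib function)
def pharse_bin_alt (num : Int) : String :=
  let bin_str := pvBinTail num
  let lev := Nat.size bin_str.length
  String.mk (List.replicate (2 ^ lev - 1 - bin_str.length) '0' ++ bin_str)

-- ===== PRECONDITION & SPEC =====
def Spec_pharse_bin (num : Int) (out : String) : Prop := out = pharse_bin_alt num
instance (num : Int) (out : String) : Decidable (Spec_pharse_bin num out) := by unfold Spec_pharse_bin; infer_instance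

-- ===== CLAIM (what is proved, stated in full; the proofs are below) =====
def Claim_equal_pharse_bin : Prop := ∀ (num : Int), Dom_pharse_bin num → Spec_pharse_bin num (pharse_bin num)

-- ===== LEMMAS AND PROOFS =====

theorem pvNatBin_ne_nil (n : Nat) (h : 0 < n) : pvNatBin n ≠ [] := by
  cases n with
  | zero => omega
  | succ m => simp [pvNatBin]

theorem pvBinTail_ne_nil (num : Int) : pvBinTail num ≠ [] := by
  unfold pvBinTail
  split
  · simp
  · split
    · simp
    · exact pvNatBin_ne_nil _ (by omega)

-- A's loop, started at any lev ≤ size L, stops exactly at size L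
theorem pvFindLev_eq_size (L : Nat) (hL : 0 < L) :
    ∀ lev, lev ≤ Nat.size L → pvFindLev L lev = Nat.size L := by
  intro lev hlev
  induction hn : Nat.size L - lev generalizing lev with
  | zero =>
    rw [pvFindLev]
    have hle : Nat.size L ≤ lev := by omega
    have : L < 2 ^ lev := Nat.lt_of_lt_of_le (Nat.lt_size_self L)
      (Nat.pow_le_pow_right (by norm_num) hle)
    rw [dif_neg (by omega)]
    omega
  | succ k ih =>
    rw [pvFindLev]
    have hlt : lev < Nat.size L := by omega
    have h2 : 2 ^ lev ≤ L := Nat.lt_size.mp hlt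
    rw [dif_pos (by omega)]
    exact ih (lev + 1) (by omega) (by omega)

theorem pvLev_agree (num : Int) :
    pvFindLev (pvBinTail num).length 1 = Nat.size (pvBinTail num).length := by
  have hL : 0 < (pvBinTail num).length :=
    List.length_pos_iff.mpr (pvBinTail_ne_nil num)
  have hsize : 1 ≤ Nat.size (pvBinTail num).length :=
    Nat.lt_size.mpr (by simpa using hL)
  exact pvFindLev_eq_size _ hL 1 hsize

-- ===== VERDICT (by name: the statement is the Claim_ definition above) =====
theorem pharse_bin_spec : Claim_equal_pharse_bin := by
  intro num _
  unfold Spec_pharse_bin pharse_bin pharse_bin_alt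
  simp only [pvLev_agree]
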